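-- pv_equiv track=rewrite | github.com/Low-Freq-Labs/pve-freq | freq/core/health_state.py | aggregate_probe_state
-- ===== SOURCE A (Python) =====
-- from typing import Optional
--
-- STATE_LIVE = "live"
--
-- STATE_STALE = "stale"
--
-- STATE_DEGRADED = "degraded"
--
-- STATE_AUTH_FAILED = "auth_failed"
--
-- STATE_UNREACHABLE = "unreachable"
--
-- STATE_RECOVERING = "recovering"
--
-- def aggregate_probe_state(host_entries: list) -> tuple[str, str]:
--     """Derive a top-level probe_state + reason from per-host entries.
--
--     Used by /api/health (and later /api/fleet/overview) so Morty's
--     silent-refresh banner does not have to guess whether the fleet is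
--     healthy by counting undefined fields.
--
--     Priority (worst wins):
--       auth_failed > unreachable > degraded > stale > recovering > live
--
--     Reason is a short operator-readable rollup: 'N of M unreachable
--     (worst: host-a publickey rejected)' or 'all 12 live'.
--     """
--     if not host_entries:
--         return STATE_DEGRADED, "no hosts in fleet"
--     priority = [
--         STATE_AUTH_FAILED,
--         STATE_UNREACHABLE,
--         STATE_DEGRADED,
--         STATE_STALE,
--         STATE_RECOVERING,
--         STATE_LIVE,
--     ]
--     counts: dict[str, int] = {s: 0 for s in priority}
--     worst_reason = ""
--     worst_host = ""
--     for e in host_entries: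
--         s = e.get("state") or legacy_back_to_state(e.get("status"))
--         counts[s] = counts.get(s, 0) + 1
--     top = STATE_LIVE
--     for s in priority:
--         if counts.get(s, 0) > 0:
--             top = s
--             break
--     if top == STATE_LIVE:
--         return STATE_LIVE, f"all {len(host_entries)} hosts live"
--     # Find the first host matching the worst state for the reason.
--     for e in host_entries:
--         if (e.get("state") or legacy_back_to_state(e.get("status"))) == top:
--             worst_reason = e.get("reason") or ""
--             worst_host = e.get("label") or e.get("ip") or ""
--             break
--     bad = counts.get(top, 0)
--     total = len(host_entries)
--     suffix = f" (worst: {worst_host} — {worst_reason})" if worst_reason else ""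
--     return top, f"{bad}/{total} {top}{suffix}"
--
-- def legacy_back_to_state(status: Optional[str]) -> str:
--     """Fallback for cache entries predating the six-state contract.
--
--     Old cache entries only carry legacy `status`; treat 'healthy' as
--     live and everything else as unreachable so the aggregator does not
--     crash on mixed-shape data during a dashboard upgrade.
--     """
--     if status == "healthy":
--         return STATE_LIVE
--     return STATE_UNREACHABLE
-- ===== SOURCE B (Python) =====
-- def aggregate_probe_state(host_entries: list) -> tuple[str, str]:
--     """Single pass: resolve each entry once, track the strictly-worst state seen,
--     the first host/reason that reached it, and how many entries share it."""
--     if not host_entries: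
--         return "degraded", "no hosts in fleet"
--     PRIO = {"auth_failed": 0, "unreachable": 1, "degraded": 2, "stale": 3,
--             "recovering": 4, "live": 5}
--     best = 6          # 6 = "never worse than live / unknown state"
--     count = 0
--     top = ""
--     worst_host = ""
--     worst_reason = ""
--     for e in host_entries:
--         s = e.get("state") or ("live" if e.get("status") == "healthy" else "unreachable")
--         i = PRIO.get(s, 6)
--         if i < best:
--             best = i
--             count = 1
--             top = s
--             worst_reason = e.get("reason") or ""
--             worst_host = e.get("label") or e.get("ip") or ""
--         elif i == best:
--             count += 1
--     if best >= 5: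
--         return "live", f"all {len(host_entries)} hosts live"
--     suffix = f" (worst: {worst_host} — {worst_reason})" if worst_reason else ""
--     return top, f"{count}/{len(host_entries)} {top}{suffix}"
-- ===== Notes on version B (the rewrite author's own statement) =====
-- stated objective: alternative
-- what changed: B replaces A's three passes (a counting dict over all six states, a scan of the priority list for the top state, and a second scan of the entries for the first worst host) by one single pass that resolves each entry once and maintains the running worst priority index, its state name, the count of entries sharing it, and the first host/reason that reached it.
import Mathlib
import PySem

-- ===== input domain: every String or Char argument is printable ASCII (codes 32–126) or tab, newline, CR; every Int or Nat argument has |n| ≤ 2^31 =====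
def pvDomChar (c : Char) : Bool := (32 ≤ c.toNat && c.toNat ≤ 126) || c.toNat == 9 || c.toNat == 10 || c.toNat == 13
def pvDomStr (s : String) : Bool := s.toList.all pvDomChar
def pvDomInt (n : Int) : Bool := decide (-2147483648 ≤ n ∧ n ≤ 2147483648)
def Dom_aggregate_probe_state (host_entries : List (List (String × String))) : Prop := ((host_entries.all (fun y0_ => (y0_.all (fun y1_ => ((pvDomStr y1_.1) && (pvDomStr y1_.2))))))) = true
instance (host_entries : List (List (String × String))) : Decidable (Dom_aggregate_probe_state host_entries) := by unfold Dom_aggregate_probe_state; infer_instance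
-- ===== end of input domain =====

-- B replaces A's three passes (count dict, priority scan, second entry scan) by a single pass
-- over the entries keeping the worst priority index, its state, count, and first host/reason
-- ('alternative': same O(n) cost, different decomposition).



-- ===== PORT A =====
-- e.get(k) on a str->str dict
def pvGetE (e : List (String × String)) (k : String) : Option String :=
  (PySem.Dict.mk e).get? k

def legacy_back_to_state (status : Option String) : String :=
  if status = some "healthy" then "live" else "unreachable"

-- `e.get("state") or legacy_back_to_state(e.get("status"))` (falsy = missing or "")
def pvResolveA (e : List (String × String)) : String :=
  let st := (pvGetE e "state").getD ""
  if st ≠ "" then st else legacy_back_to_state (pvGetE e "status")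

def pvPriority : List String :=
  ["auth_failed", "unreachable", "degraded", "stale", "recovering", "live"]

-- `for s in priority: if counts.get(s,0) > 0: top = s; break` with top = "live" initially
def pvFirstPos (counts : PySem.Dict String Int) : List String → String
  | [] => "live"
  | s :: rest => if counts.getD s 0 > 0 then s else pvFirstPos counts rest

-- the second scan: first entry whose resolved state equals top → (worst_reason, worst_host)
def pvFindWorst (top : String) : List (List (String × String)) → String × String
  | [] => ("", "")
  | e :: rest =>
      if pvResolveA e = top then
        ((pvGetE e "reason").getD "",
         let lab := (pvGetE e "label").getD ""
         if lab ≠ "" then lab else (pvGetE e "ip").getD "")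
      else pvFindWorst top rest

def aggregate_probe_state (host_entries : List (List (String × String))) : String × String :=
  if host_entries = [] then ("degraded", "no hosts in fleet")
  else
    let counts0 : PySem.Dict String Int :=
      pvPriority.foldl (fun d s => d.insert s 0) PySem.Dict.empty
    let counts :=
      host_entries.foldl (fun d e =>
        let s := pvResolveA e
        d.insert s (d.getD s 0 + 1)) counts0
    let top := pvFirstPos counts pvPriority
    if top = "live" then
      ("live", "all " ++ PySem.Int.toStr (host_entries.length : Int) ++ " hosts live")
    else
      let wr := pvFindWorst top host_entries
      let bad := counts.getD top 0
      let total : Int := (host_entries.length : Int)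
      let suffix :=
        if wr.1 ≠ "" then " (worst: " ++ wr.2 ++ " — " ++ wr.1 ++ ")" else ""
      (top, PySem.Int.toStr bad ++ "/" ++ PySem.Int.toStr total ++ " " ++ top ++ suffix)

-- ===== PORT B =====
def pvPrioD : PySem.Dict String Int :=
  PySem.Dict.ofList [("auth_failed", 0), ("unreachable", 1), ("degraded", 2),
                     ("stale", 3), ("recovering", 4), ("live", 5)]

-- `e.get("state") or ("live" if e.get("status") == "healthy" else "unreachable")`
def pvResolveB (e : List (String × String)) : String :=
  let st := (pvGetE e "state").getD ""
  if st ≠ "" then st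
  else if pvGetE e "status" = some "healthy" then "live" else "unreachable"

-- loop body over state (best, count, top, worst_host, worst_reason)
def pvStepB (acc : Int × Int × String × String × String) (e : List (String × String)) :
    Int × Int × String × String × String :=
  let s := pvResolveB e
  let i := pvPrioD.getD s 6
  if i < acc.1 then
    (i, 1, s,
     (let lab := (pvGetE e "label").getD ""
      if lab ≠ "" then lab else (pvGetE e "ip").getD ""),
     (pvGetE e "reason").getD "")
  else if i = acc.1 then (acc.1, acc.2.1 + 1, acc.2.2.1, acc.2.2.2.1, acc.2.2.2.2)
  else acc

def aggregate_probe_state_alt (host_entries : List (List (String × String))) : String × String :=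
  if host_entries = [] then ("degraded", "no hosts in fleet")
  else
    let st := host_entries.foldl pvStepB (6, 0, "", "", "")
    if st.1 ≥ 5 then
      ("live", "all " ++ PySem.Int.toStr (host_entries.length : Int) ++ " hosts live")
    else
      let top := st.2.2.1
      let suffix :=
        if st.2.2.2.2 ≠ "" then " (worst: " ++ st.2.2.2.1 ++ " — " ++ st.2.2.2.2 ++ ")" else ""
      (top, PySem.Int.toStr st.2.1 ++ "/" ++ PySem.Int.toStr (host_entries.length : Int)
            ++ " " ++ top ++ suffix)

-- ===== PRECONDITION & SPEC =====
def Spec_aggregate_probe_state (host_entries : List (List (String × String))) (out : String × String) : Prop := out = aggregate_probe_state_alt host_entries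
instance (host_entries : List (List (String × String))) (out : String × String) : Decidable (Spec_aggregate_probe_state host_entries out) := by unfold Spec_aggregate_probe_state; infer_instance

-- ===== CLAIM (what is proved, stated in full; the proofs are below) =====
def Claim_equal_aggregate_probe_state : Prop := ∀ (host_entries : List (List (String × String))), Dom_aggregate_probe_state host_entries → Spec_aggregate_probe_state host_entries (aggregate_probe_state host_entries)

-- ===== LEMMAS AND PROOFS =====

-- proof-side abbreviations for the pieces both programs compute per entry
def pvHost (e : List (String × String)) : String :=
  let lab := (pvGetE e "label").getD ""
  if lab ≠ "" then lab else (pvGetE e "ip").getD ""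

def pvReason (e : List (String × String)) : String := (pvGetE e "reason").getD ""

def pvIdx (e : List (String × String)) : Int := pvPrioD.getD (pvResolveB e) 6

def pvM (l : List (List (String × String))) : Int :=
  l.foldl (fun b e => min b (pvIdx e)) 6

def pvCnt (l : List (List (String × String))) : Int :=
  (l.countP (fun e => pvIdx e = pvM l) : Int)

def pvTrip (l : List (List (String × String))) : String × String × String :=
  if pvM l < 6 then
    match l.find? (fun e => pvIdx e = pvM l) with
    | some e => (pvResolveB e, pvHost e, pvReason e)
    | none => ("", "", "")
  else ("", "", "")

theorem resolveA_eq_resolveB (e : List (String × String)) : pvResolveA e = pvResolveB e := rfl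

theorem pvPrioD_getD (s : String) :
    pvPrioD.getD s 6 =
      if s = "auth_failed" then 0 else if s = "unreachable" then 1
      else if s = "degraded" then 2 else if s = "stale" then 3
      else if s = "recovering" then 4 else if s = "live" then 5 else 6 := by
  rw [show pvPrioD = PySem.Dict.mk [("auth_failed", 0), ("unreachable", 1), ("degraded", 2),
        ("stale", 3), ("recovering", 4), ("live", 5)] from by decide]
  simp only [PySem.Dict.getD_eq_get?_getD, PySem.Dict.get?_mk_cons]
  by_cases h1 : s = "auth_failed"; · subst h1; rfl
  by_cases h2 : s = "unreachable"; · subst h2; rfl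
  by_cases h3 : s = "degraded"; · subst h3; rfl
  by_cases h4 : s = "stale"; · subst h4; rfl
  by_cases h5 : s = "recovering"; · subst h5; rfl
  by_cases h6 : s = "live"; · subst h6; rfl
  rw [if_neg h1, if_neg h2, if_neg h3, if_neg h4, if_neg h5, if_neg h6,
    if_neg (fun h => h1 (eq_of_beq h).symm), if_neg (fun h => h2 (eq_of_beq h).symm),
    if_neg (fun h => h3 (eq_of_beq h).symm), if_neg (fun h => h4 (eq_of_beq h).symm),
    if_neg (fun h => h5 (eq_of_beq h).symm), if_neg (fun h => h6 (eq_of_beq h).symm)]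
  rfl
theorem pvIdx_def (e : List (String × String)) :
    pvIdx e =
      if pvResolveB e = "auth_failed" then 0 else if pvResolveB e = "unreachable" then 1
      else if pvResolveB e = "degraded" then 2 else if pvResolveB e = "stale" then 3
      else if pvResolveB e = "recovering" then 4 else if pvResolveB e = "live" then 5 else 6 :=
  pvPrioD_getD _

theorem pvIdx_nonneg (e : List (String × String)) : 0 ≤ pvIdx e := by
  rw [pvIdx_def]; split_ifs <;> norm_num

theorem pvIdx_le_six (e : List (String × String)) : pvIdx e ≤ 6 := by
  rw [pvIdx_def]; split_ifs <;> norm_num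

theorem pvMFrom_le (l : List (List (String × String))) :
    ∀ a : Int, l.foldl (fun b e => min b (pvIdx e)) a ≤ a := by
  induction l with
  | nil => simp
  | cons e l ih =>
      intro a
      calc l.foldl (fun b e => min b (pvIdx e)) (min a (pvIdx e)) ≤ min a (pvIdx e) := ih _
        _ ≤ a := min_le_left _ _

theorem pvMFrom_le_mem (l : List (List (String × String))) (x : List (String × String))
    (hx : x ∈ l) : ∀ a : Int, l.foldl (fun b e => min b (pvIdx e)) a ≤ pvIdx x := by
  induction l with
  | nil => simp at hx
  | cons e l ih =>
      intro a
      rcases List.mem_cons.mp hx with h | h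
      · subst h
        calc l.foldl (fun b e => min b (pvIdx e)) (min a (pvIdx x)) ≤ min a (pvIdx x) :=
              pvMFrom_le l _
          _ ≤ pvIdx x := min_le_right _ _
      · exact ih h _

theorem pvMFrom_mem (l : List (List (String × String))) :
    ∀ a : Int, l.foldl (fun b e => min b (pvIdx e)) a = a ∨
      ∃ x ∈ l, l.foldl (fun b e => min b (pvIdx e)) a = pvIdx x := by
  induction l with
  | nil => intro a; left; rfl
  | cons e l ih =>
      intro a
      rcases ih (min a (pvIdx e)) with h | ⟨x, hx, hfx⟩
      · rcases min_cases a (pvIdx e) with ⟨hm, _⟩ | ⟨hm, _⟩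
        · left; simpa [List.foldl, hm] using h
        · right; exact ⟨e, List.mem_cons_self, by simpa [List.foldl, hm] using h⟩
      · right; exact ⟨x, List.mem_cons_of_mem _ hx, hfx⟩

theorem pvM_le_mem (l : List (List (String × String))) (x : List (String × String))
    (hx : x ∈ l) : pvM l ≤ pvIdx x := pvMFrom_le_mem l x hx 6

theorem pvM_le_six (l : List (List (String × String))) : pvM l ≤ 6 := pvMFrom_le l 6

theorem pvM_nonneg (l : List (List (String × String))) : 0 ≤ pvM l := by
  rcases pvMFrom_mem l 6 with h | ⟨x, _, hx⟩
  · rw [pvM, h]; norm_num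
  · rw [pvM, hx]; exact pvIdx_nonneg x

theorem pvM_attained (l : List (List (String × String))) (h : pvM l < 6) :
    ∃ x ∈ l, pvIdx x = pvM l := by
  rcases pvMFrom_mem l 6 with h6 | ⟨x, hx, hfx⟩
  · rw [pvM] at h; omega
  · exact ⟨x, hx, hfx.symm⟩

theorem pvM_append (l : List (List (String × String))) (e : List (String × String)) :
    pvM (l ++ [e]) = min (pvM l) (pvIdx e) := by
  simp [pvM, List.foldl_append]

theorem find?_congr' {α : Type} (l : List α) (p q : α → Bool) (h : ∀ x ∈ l, p x = q x) :
    l.find? p = l.find? q := by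
  induction l with
  | nil => rfl
  | cons a l ih =>
      have ha := h a List.mem_cons_self
      by_cases hp : p a <;>
        simp [hp, ← ha, ih (fun x hx => h x (List.mem_cons_of_mem _ hx))]

theorem stB_char (l : List (List (String × String))) :
    l.foldl pvStepB (6, 0, "", "", "") = (pvM l, pvCnt l, pvTrip l) := by
  induction l using List.reverseRecOn with
  | nil => rfl
  | append_singleton l e ih =>
      rw [List.foldl_append, List.foldl_cons, List.foldl_nil, ih]
      have hbi := pvIdx_nonneg e
      have hbs := pvIdx_le_six e
      have hm6 := pvM_le_six l
      simp only [pvStepB, show ∀ x, pvPrioD.getD (pvResolveB x) 6 = pvIdx x from fun _ => rfl]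
      rcases lt_trichotomy (pvIdx e) (pvM l) with hlt | heq | hgt
      · -- strictly better: reset
        have hzero : l.countP (fun x => pvIdx x = pvIdx e) = 0 :=
          List.countP_eq_zero.mpr (fun x hx => by
            have := pvM_le_mem l x hx
            simp only [decide_eq_true_eq]
            omega)
        have hnone : l.find? (fun x => pvIdx x = pvIdx e) = none :=
          List.find?_eq_none.mpr (fun x hx => by
            have := pvM_le_mem l x hx
            simp only [decide_eq_true_eq]
            omega)
        have hmapp : pvM (l ++ [e]) = pvIdx e := by
          rw [pvM_append]; omega
        rw [if_pos hlt]
        refine Prod.ext ?_ (Prod.ext ?_ ?_)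
        · simp [hmapp]
        · simp [pvCnt, hmapp, List.countP_append, hzero]
        · simp only [pvTrip, hmapp, List.find?_append, hnone, if_pos (show pvIdx e < 6 by omega)]
          simp [pvHost, pvReason]
      · -- equal: bump count
        have hmapp : pvM (l ++ [e]) = pvM l := by rw [pvM_append]; omega
        rw [if_neg (by omega : ¬ pvIdx e < pvM l), if_pos heq]
        refine Prod.ext ?_ (Prod.ext ?_ ?_)
        · simp [hmapp]
        · simp [pvCnt, hmapp, List.countP_append, heq]
        · by_cases h6 : pvM l < 6
          · obtain ⟨x, hx, hix⟩ := pvM_attained l h6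
            have hsome : (l.find? (fun x => pvIdx x = pvM l)).isSome := by
              rw [List.find?_isSome]
              exact ⟨x, hx, by simpa using hix⟩
            obtain ⟨v, hv⟩ := Option.isSome_iff_exists.mp hsome
            simp only [pvTrip, hmapp, if_pos h6, List.find?_append, hv]
            rfl
          · simp only [pvTrip, hmapp, if_neg h6]
      · -- worse: unchanged
        have hmapp : pvM (l ++ [e]) = pvM l := by rw [pvM_append]; omega
        rw [if_neg (by omega : ¬ pvIdx e < pvM l), if_neg (by omega : ¬ pvIdx e = pvM l)]
        refine Prod.ext ?_ (Prod.ext ?_ ?_)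
        · simp [hmapp]
        · have hne : ¬ pvIdx e = pvM l := by omega
          simp [pvCnt, hmapp, List.countP_append, hne]
        · by_cases h6 : pvM l < 6
          · obtain ⟨x, hx, hix⟩ := pvM_attained l h6
            have hsome : (l.find? (fun x => pvIdx x = pvM l)).isSome := by
              rw [List.find?_isSome]
              exact ⟨x, hx, by simpa using hix⟩
            obtain ⟨v, hv⟩ := Option.isSome_iff_exists.mp hsome
            simp only [pvTrip, hmapp, if_pos h6, List.find?_append, hv]
            rfl
          · simp only [pvTrip, hmapp, if_neg h6]
theorem counts_getD (l : List (List (String × String))) (s : String) :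
    (l.foldl (fun d e => d.insert (pvResolveA e) (d.getD (pvResolveA e) 0 + 1))
      (List.foldl (fun d s => d.insert s 0) PySem.Dict.empty
        ["auth_failed", "unreachable", "degraded", "stale", "recovering", "live"])).getD s 0 =
    (l.countP (fun e => pvResolveB e = s) : Int) := by
  have h := PySem.Dict.getD_foldl_insert_add_one
    (l := l.map pvResolveA)
    (d := List.foldl (fun d s => d.insert s 0) PySem.Dict.empty
      ["auth_failed", "unreachable", "degraded", "stale", "recovering", "live"]) (v := s)
  rw [List.foldl_map] at h
  rw [h]
  have h0 : (List.foldl (fun d s => d.insert s 0) PySem.Dict.empty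
      ["auth_failed", "unreachable", "degraded", "stale", "recovering", "live"]).getD s 0 = (0:Int) := by
    simp only [List.foldl_cons, List.foldl_nil, PySem.Dict.getD_insert]
    split_ifs <;> rfl
  rw [h0, zero_add]
  norm_cast
  rw [List.count_eq_countP, List.countP_map]
  apply List.countP_congr
  intro e _
  show ((pvResolveA e == s) = true ↔ decide (pvResolveB e = s) = true)
  rw [show pvResolveA e = pvResolveB e from rfl]
  simp

theorem findWorst_char (top : String) (l : List (List (String × String))) :
    pvFindWorst top l =
      match l.find? (fun e => pvResolveB e = top) with
      | some e => (pvReason e, pvHost e)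
      | none => ("", "") := by
  induction l with
  | nil => rfl
  | cons e l ih =>
      by_cases h : pvResolveB e = top <;>
        simp [pvFindWorst, resolveA_eq_resolveB, h, ih, pvReason, pvHost]

-- ===== VERDICT (by name: the statement is the Claim_ definition above) =====
theorem idx_iff_name (e : List (String × String)) :
    (pvIdx e = 0 ↔ pvResolveB e = "auth_failed") ∧
    (pvIdx e = 1 ↔ pvResolveB e = "unreachable") ∧
    (pvIdx e = 2 ↔ pvResolveB e = "degraded") ∧
    (pvIdx e = 3 ↔ pvResolveB e = "stale") ∧
    (pvIdx e = 4 ↔ pvResolveB e = "recovering") ∧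
    (pvIdx e = 5 ↔ pvResolveB e = "live") := by
  rw [pvIdx_def]; split_ifs <;> simp_all

theorem countP_name_eq (l : List (List (String × String))) (k : Int) (s : String)
    (h : ∀ e, pvIdx e = k ↔ pvResolveB e = s) :
    l.countP (fun e => pvResolveB e = s) = l.countP (fun e => pvIdx e = k) :=
  (List.countP_congr (fun x _ => by simp [h x])).symm

theorem find?_name_eq (l : List (List (String × String))) (k : Int) (s : String)
    (h : ∀ e, pvIdx e = k ↔ pvResolveB e = s) :
    l.find? (fun e => pvResolveB e = s) = l.find? (fun e => pvIdx e = k) :=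
  (find?_congr' l _ _ (fun x _ => by simp [h x])).symm

theorem aggregate_probe_state_spec : Claim_equal_aggregate_probe_state := by
  unfold Claim_equal_aggregate_probe_state
  intro l _
  unfold Spec_aggregate_probe_state
  by_cases hne : l = []
  · subst hne; rfl
  have h0 : ∀ e, pvIdx e = 0 ↔ pvResolveB e = "auth_failed" := fun e => (idx_iff_name e).1
  have h1 : ∀ e, pvIdx e = 1 ↔ pvResolveB e = "unreachable" := fun e => (idx_iff_name e).2.1
  have h2 : ∀ e, pvIdx e = 2 ↔ pvResolveB e = "degraded" := fun e => (idx_iff_name e).2.2.1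
  have h3 : ∀ e, pvIdx e = 3 ↔ pvResolveB e = "stale" := fun e => (idx_iff_name e).2.2.2.1
  have h4 : ∀ e, pvIdx e = 4 ↔ pvResolveB e = "recovering" := fun e => (idx_iff_name e).2.2.2.2.1
  have h5 : ∀ e, pvIdx e = 5 ↔ pvResolveB e = "live" := fun e => (idx_iff_name e).2.2.2.2.2
  have hmem := pvM_le_mem l
  have hz : ∀ k : Int, k < pvM l → l.countP (fun e => pvIdx e = k) = 0 := by
    intro k hk
    exact List.countP_eq_zero.mpr (fun x hx => by
      have := hmem x hx; simp only [decide_eq_true_eq]; omega)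
  simp only [aggregate_probe_state, aggregate_probe_state_alt, if_neg hne]
  rw [stB_char l]
  simp only [pvFirstPos, pvPriority, counts_getD l, findWorst_char,
    countP_name_eq l 0 _ h0, countP_name_eq l 1 _ h1, countP_name_eq l 2 _ h2,
    countP_name_eq l 3 _ h3, countP_name_eq l 4 _ h4, countP_name_eq l 5 _ h5]
  have hm0 := pvM_nonneg l
  have hm6 := pvM_le_six l
  have hcase : pvM l = 0 ∨ pvM l = 1 ∨ pvM l = 2 ∨ pvM l = 3 ∨ pvM l = 4 ∨ pvM l = 5 ∨ pvM l = 6 := by omega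
  rcases hcase with hk | hk | hk | hk | hk | hk | hk
  · -- pvM l = 0

    obtain ⟨x0, hx0, hix0⟩ := pvM_attained l (by omega)
    have hpos : (0:Int) < (l.countP (fun e => pvIdx e = pvM l) : Int) :=
      Int.natCast_pos.mpr (List.countP_pos_iff.mpr ⟨x0, hx0, by simp [hix0]⟩)
    have hfs : (l.find? (fun e => pvIdx e = pvM l)).isSome :=
      List.find?_isSome.mpr ⟨x0, hx0, by simp [hix0]⟩
    obtain ⟨e0, he0⟩ := Option.isSome_iff_exists.mp hfs
    have hpe0 : pvIdx e0 = pvM l := by simpa using List.find?_some he0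
    have hres : pvResolveB e0 = "auth_failed" := (h0 e0).mp (by omega)
    rw [hk] at hpos he0 ⊢
    simp only [pvCnt, pvTrip, hk, hpos, he0, hres]
    norm_num
    rw [countP_name_eq l 0 _ h0, find?_name_eq l 0 _ h0, he0]
    simp
  · -- pvM l = 1
    have hz0 : l.countP (fun e => pvIdx e = (0:Int)) = 0 := hz 0 (by omega)
    obtain ⟨x0, hx0, hix0⟩ := pvM_attained l (by omega)
    have hpos : (0:Int) < (l.countP (fun e => pvIdx e = pvM l) : Int) :=
      Int.natCast_pos.mpr (List.countP_pos_iff.mpr ⟨x0, hx0, by simp [hix0]⟩)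
    have hfs : (l.find? (fun e => pvIdx e = pvM l)).isSome :=
      List.find?_isSome.mpr ⟨x0, hx0, by simp [hix0]⟩
    obtain ⟨e0, he0⟩ := Option.isSome_iff_exists.mp hfs
    have hpe0 : pvIdx e0 = pvM l := by simpa using List.find?_some he0
    have hres : pvResolveB e0 = "unreachable" := (h1 e0).mp (by omega)
    rw [hk] at hpos he0 ⊢
    simp only [pvCnt, pvTrip, hk, hz0, hpos, he0, hres]
    norm_num
    rw [countP_name_eq l 1 _ h1, find?_name_eq l 1 _ h1, he0]
    simp
  · -- pvM l = 2
    have hz0 : l.countP (fun e => pvIdx e = (0:Int)) = 0 := hz 0 (by omega)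
    have hz1 : l.countP (fun e => pvIdx e = (1:Int)) = 0 := hz 1 (by omega)
    obtain ⟨x0, hx0, hix0⟩ := pvM_attained l (by omega)
    have hpos : (0:Int) < (l.countP (fun e => pvIdx e = pvM l) : Int) :=
      Int.natCast_pos.mpr (List.countP_pos_iff.mpr ⟨x0, hx0, by simp [hix0]⟩)
    have hfs : (l.find? (fun e => pvIdx e = pvM l)).isSome :=
      List.find?_isSome.mpr ⟨x0, hx0, by simp [hix0]⟩
    obtain ⟨e0, he0⟩ := Option.isSome_iff_exists.mp hfs
    have hpe0 : pvIdx e0 = pvM l := by simpa using List.find?_some he0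
    have hres : pvResolveB e0 = "degraded" := (h2 e0).mp (by omega)
    rw [hk] at hpos he0 ⊢
    simp only [pvCnt, pvTrip, hk, hz0, hz1, hpos, he0, hres]
    norm_num
    rw [countP_name_eq l 2 _ h2, find?_name_eq l 2 _ h2, he0]
    simp
  · -- pvM l = 3
    have hz0 : l.countP (fun e => pvIdx e = (0:Int)) = 0 := hz 0 (by omega)
    have hz1 : l.countP (fun e => pvIdx e = (1:Int)) = 0 := hz 1 (by omega)
    have hz2 : l.countP (fun e => pvIdx e = (2:Int)) = 0 := hz 2 (by omega)
    obtain ⟨x0, hx0, hix0⟩ := pvM_attained l (by omega)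
    have hpos : (0:Int) < (l.countP (fun e => pvIdx e = pvM l) : Int) :=
      Int.natCast_pos.mpr (List.countP_pos_iff.mpr ⟨x0, hx0, by simp [hix0]⟩)
    have hfs : (l.find? (fun e => pvIdx e = pvM l)).isSome :=
      List.find?_isSome.mpr ⟨x0, hx0, by simp [hix0]⟩
    obtain ⟨e0, he0⟩ := Option.isSome_iff_exists.mp hfs
    have hpe0 : pvIdx e0 = pvM l := by simpa using List.find?_some he0
    have hres : pvResolveB e0 = "stale" := (h3 e0).mp (by omega)
    rw [hk] at hpos he0 ⊢
    simp only [pvCnt, pvTrip, hk, hz0, hz1, hz2, hpos, he0, hres]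
    norm_num
    rw [countP_name_eq l 3 _ h3, find?_name_eq l 3 _ h3, he0]
    simp
  · -- pvM l = 4
    have hz0 : l.countP (fun e => pvIdx e = (0:Int)) = 0 := hz 0 (by omega)
    have hz1 : l.countP (fun e => pvIdx e = (1:Int)) = 0 := hz 1 (by omega)
    have hz2 : l.countP (fun e => pvIdx e = (2:Int)) = 0 := hz 2 (by omega)
    have hz3 : l.countP (fun e => pvIdx e = (3:Int)) = 0 := hz 3 (by omega)
    obtain ⟨x0, hx0, hix0⟩ := pvM_attained l (by omega)
    have hpos : (0:Int) < (l.countP (fun e => pvIdx e = pvM l) : Int) :=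
      Int.natCast_pos.mpr (List.countP_pos_iff.mpr ⟨x0, hx0, by simp [hix0]⟩)
    have hfs : (l.find? (fun e => pvIdx e = pvM l)).isSome :=
      List.find?_isSome.mpr ⟨x0, hx0, by simp [hix0]⟩
    obtain ⟨e0, he0⟩ := Option.isSome_iff_exists.mp hfs
    have hpe0 : pvIdx e0 = pvM l := by simpa using List.find?_some he0
    have hres : pvResolveB e0 = "recovering" := (h4 e0).mp (by omega)
    rw [hk] at hpos he0 ⊢
    simp only [pvCnt, pvTrip, hk, hz0, hz1, hz2, hz3, hpos, he0, hres]
    norm_num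
    rw [countP_name_eq l 4 _ h4, find?_name_eq l 4 _ h4, he0]
    simp
  · -- pvM l = 5 : everything is live
    have hz0 : l.countP (fun e => pvIdx e = (0:Int)) = 0 := hz 0 (by omega)
    have hz1 : l.countP (fun e => pvIdx e = (1:Int)) = 0 := hz 1 (by omega)
    have hz2 : l.countP (fun e => pvIdx e = (2:Int)) = 0 := hz 2 (by omega)
    have hz3 : l.countP (fun e => pvIdx e = (3:Int)) = 0 := hz 3 (by omega)
    have hz4 : l.countP (fun e => pvIdx e = (4:Int)) = 0 := hz 4 (by omega)
    simp only [hk, hz0, hz1, hz2, hz3, hz4]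
    norm_num
  · -- pvM l = 6 : no priority state present at all
    have hz0 : l.countP (fun e => pvIdx e = (0:Int)) = 0 := hz 0 (by omega)
    have hz1 : l.countP (fun e => pvIdx e = (1:Int)) = 0 := hz 1 (by omega)
    have hz2 : l.countP (fun e => pvIdx e = (2:Int)) = 0 := hz 2 (by omega)
    have hz3 : l.countP (fun e => pvIdx e = (3:Int)) = 0 := hz 3 (by omega)
    have hz4 : l.countP (fun e => pvIdx e = (4:Int)) = 0 := hz 4 (by omega)
    have hz5 : l.countP (fun e => pvIdx e = (5:Int)) = 0 := hz 5 (by omega)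
    simp only [hk, hz0, hz1, hz2, hz3, hz4, hz5]
    norm_num

-- ===== VERDICT (by name: the statement is the Claim_ definition above) =====
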